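-- pv_equiv track=rewrite | github.com/Observances/Rand | game.py | solve
-- ===== SOURCE A (Python) =====
-- def solve(s0, s1):
--     counter = 0
--     n = s0
--     m = s1
--     for items in n:
--         items=int(items)
--         for items2 in m:
--             items2=int(items2)
--             if items == items2:
--                 counter += 1
--
--     return counter
-- ===== SOURCE B (Python) =====
-- def solve(s0, s1):
--     c0 = {}
--     for x in s0:
--         x = int(x)
--         c0[x] = c0.get(x, 0) + 1
--     c1 = {}
--     for y in s1:
--         y = int(y)
--         c1[y] = c1.get(y, 0) + 1
--     total = 0
--     for d, c in c0.items():
--         total += c * c1.get(d, 0)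
--     return total
-- ===== Notes on version B (the rewrite author's own statement) =====
-- stated objective: faster
-- what changed: Replaces the nested per-element double loop with two frequency dictionaries (histograms) built in one pass each, then a dot product c0[d]*c1[d] over the distinct values of s0.
import Mathlib
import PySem

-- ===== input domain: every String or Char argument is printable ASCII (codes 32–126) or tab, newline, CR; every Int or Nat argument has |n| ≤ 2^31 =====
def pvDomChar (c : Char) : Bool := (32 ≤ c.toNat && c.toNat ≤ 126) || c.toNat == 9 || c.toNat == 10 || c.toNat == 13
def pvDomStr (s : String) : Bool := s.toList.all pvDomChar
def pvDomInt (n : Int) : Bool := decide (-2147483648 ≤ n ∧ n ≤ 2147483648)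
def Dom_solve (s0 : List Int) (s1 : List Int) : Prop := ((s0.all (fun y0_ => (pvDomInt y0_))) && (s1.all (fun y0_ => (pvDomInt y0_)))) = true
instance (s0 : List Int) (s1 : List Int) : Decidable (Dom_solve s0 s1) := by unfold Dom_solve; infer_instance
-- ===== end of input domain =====

-- B builds a frequency dictionary for each list and sums c0[d]*c1[d] over s0's distinct values,
-- replacing A's nested double loop (objective: faster, one pass per list plus a dot product).

-- ===== PORT A =====
-- nested loop: for items in s0, for items2 in s1, count equal pairs (int() is identity on Int)
def solve (s0 : List Int) (s1 : List Int) : Int :=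
  s0.foldl (fun counter items =>
    s1.foldl (fun c items2 => if items = items2 then c + 1 else c) counter) 0

-- ===== PORT B =====
-- two histogram-building loops (d[x] = d.get(x,0)+1), then a dot product over c0.items()
def solve_alt (s0 : List Int) (s1 : List Int) : Int :=
  let c0 : PySem.Dict Int Int := s0.foldl (fun d x => d.insert x (d.getD x 0 + 1)) PySem.Dict.empty
  let c1 : PySem.Dict Int Int := s1.foldl (fun d x => d.insert x (d.getD x 0 + 1)) PySem.Dict.empty
  c0.items.foldl (fun total kc => total + kc.2 * c1.getD kc.1 0) 0

-- ===== PRECONDITION & SPEC =====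
def Spec_solve (s0 : List Int) (s1 : List Int) (out : Int) : Prop := out = solve_alt s0 s1
instance (s0 : List Int) (s1 : List Int) (out : Int) : Decidable (Spec_solve s0 s1 out) := by unfold Spec_solve; infer_instance

-- ===== CLAIM (what is proved, stated in full; the proofs are below) =====
def Claim_equal_solve : Prop := ∀ (s0 : List Int) (s1 : List Int), Dom_solve s0 s1 → Spec_solve s0 s1 (solve s0 s1)

-- ===== LEMMAS AND PROOFS =====

lemma inner_loop (s1 : List Int) (x acc : Int) :
    s1.foldl (fun c y => if x = y then c + 1 else c) acc = acc + (s1.count x : Int) := by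
  induction s1 generalizing acc with
  | nil => simp
  | cons y t ih =>
    simp only [List.foldl_cons, ih, List.count_cons]
    by_cases h : x = y
    · simp [h]; ring
    · simp [h, Ne.symm h]

lemma outer_loop (s0 s1 : List Int) (acc : Int) :
    s0.foldl (fun counter items =>
      s1.foldl (fun c items2 => if items = items2 then c + 1 else c) counter) acc
      = acc + (s0.map (fun x => (s1.count x : Int))).sum := by
  induction s0 generalizing acc with
  | nil => simp
  | cons x t ih => rw [List.foldl_cons, inner_loop, ih]; simp only [List.map_cons, List.sum_cons]; ring

lemma solve_eq_sum (s0 s1 : List Int) :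
    solve s0 s1 = (s0.map (fun x => (s1.count x : Int))).sum := by
  unfold solve; rw [outer_loop]; ring

lemma sum_ite_mem {ks : List Int} (f : Int → Int) (x : Int) (hnd : ks.Nodup) (hx : x ∈ ks) :
    (ks.map (fun k => if x = k then f k else 0)).sum = f x := by
  induction ks with
  | nil => cases hx
  | cons k t ih =>
    simp only [List.map_cons, List.sum_cons]
    rcases List.mem_cons.mp hx with rfl | hxt
    · have : (t.map (fun k => if x = k then f k else 0)).sum = 0 := by
        apply List.sum_eq_zero
        intro a ha
        simp only [List.mem_map] at ha
        obtain ⟨b, hb, rfl⟩ := ha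
        have : x ≠ b := fun h => (List.nodup_cons.mp hnd).1 (h ▸ hb)
        simp [this]
      simp [this]
    · have hne : x ≠ k := fun h => (List.nodup_cons.mp hnd).1 (h ▸ hxt)
      simp [hne, ih (List.nodup_cons.mp hnd).2 hxt]

lemma sum_map_add_sum (ks : List Int) (f g : Int → Int) :
    (ks.map f).sum + (ks.map g).sum = (ks.map (fun k => f k + g k)).sum := by
  induction ks with
  | nil => simp
  | cons k t ih => simp only [List.map_cons, List.sum_cons, ← ih]; ring

lemma sum_counts {ks : List Int} (l : List Int) (f : Int → Int) (hnd : ks.Nodup)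
    (hsub : ∀ x ∈ l, x ∈ ks) :
    (l.map f).sum = (ks.map (fun k => (l.count k : Int) * f k)).sum := by
  induction l with
  | nil => simp
  | cons x t ih =>
    have hsub' : ∀ y ∈ t, y ∈ ks := fun y hy => hsub y (List.mem_cons_of_mem _ hy)
    simp only [List.map_cons, List.sum_cons, ih hsub']
    have hsplit : ∀ k : Int, (((x :: t).count k : Int)) * f k
        = (t.count k : Int) * f k + (if x = k then f k else 0) := by
      intro k
      rw [List.count_cons]
      by_cases h : x = k
      · simp [h]; ring
      · simp [h]
    calc f x + (ks.map fun k => (t.count k : Int) * f k).sum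
        = (ks.map fun k => (t.count k : Int) * f k).sum
          + (ks.map (fun k => if x = k then f k else 0)).sum := by
          rw [sum_ite_mem f x hnd (hsub x (List.mem_cons_self))]; ring
      _ = (ks.map fun k => ((x :: t).count k : Int) * f k).sum := by
          rw [sum_map_add_sum]
          exact congrArg List.sum (List.map_congr_left fun k _ => (hsplit k).symm)

-- ===== VERDICT (by name: the statement is the Claim_ definition above) =====
lemma solve_alt_eq_sum (s0 s1 : List Int) :
    solve_alt s0 s1
      = ((PySem.Set.ofList s0).map
          (fun k => (s0.count k : Int) * (s1.count k : Int))).sum := by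
  unfold solve_alt
  simp only [PySem.Dict.foldl_insert_getD_add_one_eq_counter, PySem.List.foldl_add,
    PySem.Dict.items_counter, List.map_map]
  simp [Function.comp_def]

theorem solve_spec : Claim_equal_solve := by
  intro s0 s1 _
  unfold Spec_solve
  rw [solve_eq_sum, solve_alt_eq_sum,
    sum_counts (ks := PySem.Set.ofList s0) s0 (fun x => (s1.count x : Int))
      (PySem.Set.nodup_ofList s0) (fun x hx => (PySem.Set.mem_ofList s0 x).mpr hx)]
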